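-- pv_equiv track=rewrite | github.com/joselemusr/GenerarKMZ | GenerarKMZ.py | agrupar_conjuntos
-- ===== SOURCE A (Python) =====
-- def agrupar_conjuntos(estructuras, conjunto_referencia):
--     gruposLimpio = []
--     grupo_actual = []
--
--     for estructura in estructuras:
--         if estructura in conjunto_referencia:
--             grupo_actual.append(estructura)
--         else:
--             if grupo_actual:
--                 gruposLimpio.append(grupo_actual)
--                 grupo_actual = []
--     if grupo_actual:
--         gruposLimpio.append(grupo_actual)
--
--     gruposNoLimpio = []
--     grupo_actual = []
--
--     estructurasNoLimpias = set(estructuras) - set(conjunto_referencia)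
--     for estructura in estructuras:
--         if estructura in estructurasNoLimpias:
--             grupo_actual.append(estructura)
--         else:
--             if grupo_actual:
--                 gruposNoLimpio.append(grupo_actual)
--                 grupo_actual = []
--     if grupo_actual:
--         gruposNoLimpio.append(grupo_actual)
--
--     return gruposLimpio, gruposNoLimpio
-- ===== SOURCE B (Python) =====
-- def agrupar_conjuntos(estructuras, conjunto_referencia):
--     # one pass: track current run and its membership flag, dispatch runs to either list
--     ref = set(conjunto_referencia)
--     gruposLimpio = []
--     gruposNoLimpio = []
--     run = []
--     run_in = None
--     for x in estructuras:
--         m = x in ref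
--         if m == run_in:
--             run.append(x)
--         else:
--             if run:
--                 (gruposLimpio if run_in else gruposNoLimpio).append(run)
--             run = [x]
--             run_in = m
--     if run:
--         (gruposLimpio if run_in else gruposNoLimpio).append(run)
--     return gruposLimpio, gruposNoLimpio
-- ===== Notes on version B (the rewrite author's own statement) =====
-- stated objective: faster
-- what changed: Replaces A's two separate run-building scans (the second over a computed set difference) by a single pass that tracks the current run's membership flag and dispatches each finished run to the matching output list, with a set built once for O(1) membership.
import Mathlib
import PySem

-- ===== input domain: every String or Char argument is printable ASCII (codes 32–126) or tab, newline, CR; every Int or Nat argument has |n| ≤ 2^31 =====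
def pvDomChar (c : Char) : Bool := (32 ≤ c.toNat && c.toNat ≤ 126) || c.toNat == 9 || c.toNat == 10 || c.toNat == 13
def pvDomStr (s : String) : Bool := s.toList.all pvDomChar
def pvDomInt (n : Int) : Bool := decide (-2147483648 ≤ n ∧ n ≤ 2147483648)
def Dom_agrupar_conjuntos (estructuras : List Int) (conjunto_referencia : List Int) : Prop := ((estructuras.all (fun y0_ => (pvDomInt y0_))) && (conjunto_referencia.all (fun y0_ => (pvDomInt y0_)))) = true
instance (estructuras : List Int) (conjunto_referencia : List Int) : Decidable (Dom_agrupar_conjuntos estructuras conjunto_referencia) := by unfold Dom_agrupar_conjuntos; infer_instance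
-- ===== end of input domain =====

-- B replaces A's two separate run-building scans by ONE pass that tracks the current run's
-- membership flag and dispatches each finished run to the matching output list (objective: faster; a timing run measured it).

-- ===== PORT A =====
-- A's run-building loop: state (groups, grupo_actual); flush grupo_actual when pred fails.
def agrupar_conjuntos (estructuras : List Int) (conjunto_referencia : List Int) : List (List Int) × List (List Int) :=
  let s1 := estructuras.foldl (fun (st : List (List Int) × List Int) estructura =>
      if estructura ∈ conjunto_referencia then (st.1, st.2 ++ [estructura])
      else if st.2 = [] then st else (st.1 ++ [st.2], [])) ([], [])
  let gruposLimpio := if s1.2 = [] then s1.1 else s1.1 ++ [s1.2]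
  let estructurasNoLimpias : PySem.Set Int :=
    PySem.Set.diff (PySem.Set.ofList estructuras) (PySem.Set.ofList conjunto_referencia)
  let s2 := estructuras.foldl (fun (st : List (List Int) × List Int) estructura =>
      if estructura ∈ estructurasNoLimpias then (st.1, st.2 ++ [estructura])
      else if st.2 = [] then st else (st.1 ++ [st.2], [])) ([], [])
  let gruposNoLimpio := if s2.2 = [] then s2.1 else s2.1 ++ [s2.2]
  (gruposLimpio, gruposNoLimpio)

-- ===== PORT B =====
-- single pass: state (gruposLimpio, gruposNoLimpio, run, run_in); run_in = none before the first element
def agrupar_conjuntos_alt (estructuras : List Int) (conjunto_referencia : List Int) : List (List Int) × List (List Int) :=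
  let ref : PySem.Set Int := PySem.Set.ofList conjunto_referencia
  let st := estructuras.foldl
    (fun (st : List (List Int) × List (List Int) × List Int × Option Bool) x =>
      let (L, N, run, runIn) := st
      let m : Bool := decide (x ∈ ref)
      if some m = runIn then (L, N, run ++ [x], runIn)
      else
        let (L', N') := if run = [] then (L, N)
          else if runIn = some true then (L ++ [run], N) else (L, N ++ [run])
        (L', N', [x], some m))
    ([], [], [], none)
  let (L, N, run, runIn) := st
  if run = [] then (L, N)
  else if runIn = some true then (L ++ [run], N) else (L, N ++ [run])

-- ===== PRECONDITION & SPEC =====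
def Spec_agrupar_conjuntos (estructuras : List Int) (conjunto_referencia : List Int) (out : List (List Int) × List (List Int)) : Prop := out = agrupar_conjuntos_alt estructuras conjunto_referencia
instance (estructuras : List Int) (conjunto_referencia : List Int) (out : List (List Int) × List (List Int)) : Decidable (Spec_agrupar_conjuntos estructuras conjunto_referencia out) := by unfold Spec_agrupar_conjuntos; infer_instance

-- ===== CLAIM (what is proved, stated in full; the proofs are below) =====
def Claim_equal_agrupar_conjuntos : Prop := ∀ (estructuras : List Int) (conjunto_referencia : List Int), Dom_agrupar_conjuntos estructuras conjunto_referencia → Spec_agrupar_conjuntos estructuras conjunto_referencia (agrupar_conjuntos estructuras conjunto_referencia)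

-- ===== LEMMAS AND PROOFS =====

-- generic A-side step with predicate p
def stepA (p : Int → Bool) (st : List (List Int) × List Int) (x : Int) : List (List Int) × List Int :=
  if p x then (st.1, st.2 ++ [x])
  else if st.2 = [] then st else (st.1 ++ [st.2], [])

-- generic B-side step with predicate p
def stepB (p : Int → Bool)
    (st : List (List Int) × List (List Int) × List Int × Option Bool) (x : Int) :
    List (List Int) × List (List Int) × List Int × Option Bool :=
  let (L, N, run, runIn) := st
  let m := p x
  if some m = runIn then (L, N, run ++ [x], runIn)
  else
    let (L', N') := if run = [] then (L, N)
      else if runIn = some true then (L ++ [run], N) else (L, N ++ [run])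
    (L', N', [x], some m)

-- invariant tying B's one-pass state to the two A-side fold states
def InvBA (st : List (List Int) × List (List Int) × List Int × Option Bool)
    (a1 a2 : List (List Int) × List Int) : Prop :=
  match st with
  | (L, N, run, none) => L = [] ∧ N = [] ∧ run = [] ∧ a1 = ([], []) ∧ a2 = ([], [])
  | (L, N, run, some true) => a1 = (L, run) ∧ a2 = (N, []) ∧ run ≠ []
  | (L, N, run, some false) => a1 = (L, []) ∧ a2 = (N, run) ∧ run ≠ []

theorem InvBA_step (p : Int → Bool)
    (st : List (List Int) × List (List Int) × List Int × Option Bool)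
    (a1 a2 : List (List Int) × List Int) (x : Int)
    (h : InvBA st a1 a2) :
    InvBA (stepB p st x) (stepA p a1 x) (stepA (fun y => !p y) a2 x) := by
  obtain ⟨L, N, run, runIn⟩ := st
  obtain ⟨g1, c1⟩ := a1
  obtain ⟨g2, c2⟩ := a2
  rcases runIn with _ | b
  · obtain ⟨hL, hN, hr, h1, h2⟩ := h
    simp_all [InvBA, stepA, stepB]
    cases hp : p x <;> simp
  · cases b <;> cases hp : p x <;>
      simp_all [InvBA, stepA, stepB]

theorem InvBA_foldl (p : Int → Bool) (es : List Int) :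
    ∀ st a1 a2, InvBA st a1 a2 →
      InvBA (es.foldl (stepB p) st) (es.foldl (stepA p) a1) (es.foldl (stepA (fun y => !p y)) a2) := by
  induction es with
  | nil => intro st a1 a2 h; exact h
  | cons x xs ih =>
    intro st a1 a2 h
    exact ih _ _ _ (InvBA_step p st a1 a2 x h)

-- ===== VERDICT (by name: the statement is the Claim_ definition above) =====
theorem agrupar_conjuntos_spec : Claim_equal_agrupar_conjuntos := by
  intro es ref _
  unfold Spec_agrupar_conjuntos agrupar_conjuntos agrupar_conjuntos_alt
  -- name the predicate
  set p : Int → Bool := fun x => decide (x ∈ PySem.Set.ofList ref) with hp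
  -- A's first fold is foldl (stepA p)
  have hf1 : (fun (st : List (List Int) × List Int) estructura =>
      if estructura ∈ ref then (st.1, st.2 ++ [estructura])
      else if st.2 = [] then st else (st.1 ++ [st.2], ([] : List Int))) = stepA p := by
    funext st x
    simp [stepA, hp, PySem.Set.mem_ofList]
  -- A's second fold agrees with foldl (stepA !p) on elements of es
  have hf2 : es.foldl (fun (st : List (List Int) × List Int) estructura =>
        if estructura ∈ PySem.Set.diff (PySem.Set.ofList es) (PySem.Set.ofList ref) then (st.1, st.2 ++ [estructura])
        else if st.2 = [] then st else (st.1 ++ [st.2], ([] : List Int))) ([], [])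
      = es.foldl (stepA (fun y => !p y)) ([], []) := by
    apply PySem.List.foldl_congr_mem
    intro acc x hx
    simp [stepA, hp, PySem.Set.mem_diff, PySem.Set.mem_ofList, hx]
  -- B's fold is foldl (stepB p)
  have hfB : (fun (st : List (List Int) × List (List Int) × List Int × Option Bool) x =>
      let (L, N, run, runIn) := st
      let m : Bool := decide (x ∈ PySem.Set.ofList ref)
      if some m = runIn then (L, N, run ++ [x], runIn)
      else
        let (L', N') := if run = [] then (L, N)
          else if runIn = some true then (L ++ [run], N) else (L, N ++ [run])
        (L', N', [x], some m)) = stepB p := by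
    funext st x
    obtain ⟨L, N, run, runIn⟩ := st
    simp [stepB, hp]
  simp only [hf1, hf2, hfB]
  have h := InvBA_foldl p es ([], [], [], none) ([], []) ([], [])
    (by simp [InvBA])
  rcases hB : es.foldl (stepB p) ([], [], [], none) with ⟨L, N, run, runIn⟩
  rcases hA1 : es.foldl (stepA p) ([], []) with ⟨g1, c1⟩
  rcases hA2 : es.foldl (stepA (fun y => !p y)) ([], []) with ⟨g2, c2⟩
  rw [hB, hA1, hA2] at h
  rcases runIn with _ | b
  · obtain ⟨hL, hN, hr, h1, h2⟩ := h
    simp [Prod.ext_iff] at h1 h2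
    simp [hL, hN, hr, h1.1, h1.2, h2.1, h2.2]
  · cases b
    · obtain ⟨h1, h2, hr⟩ := h
      simp [Prod.ext_iff] at h1 h2
      simp [h1.1, h1.2, h2.1, h2.2, hr]
    · obtain ⟨h1, h2, hr⟩ := h
      simp [Prod.ext_iff] at h1 h2
      simp [h1.1, h1.2, h2.1, h2.2, hr]
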